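-- pv_equiv track=rewrite | github.com/braunmarek/UCTPfittingtools | main.py | sort_by_suffix
-- ===== SOURCE A (Python) =====
-- def sort_by_suffix(lst):
--     # Dictionnaire pour stocker les groupes selon les suffixes
--     groups = {}
--
--     # Séparer les éléments en groupes basés sur leurs suffixes
--     for item in lst:
--         # Extraire le suffixe en prenant la première partie non numérique
--         suffix = ''.join(filter(lambda x: not x.isdigit(), item))
--         number = ''.join(filter(str.isdigit, item))
--
--         # Ajouter l'élément dans le groupe correspondant
--         if suffix not in groups:
--             groups[suffix] = []
--         groups[suffix].append((int(number), item))
--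
--     # Trier chaque groupe par la partie numérique et recréer la liste triée
--     sorted_list = []
--     for suffix in sorted(groups):
--         # Trier les éléments du groupe par la partie numérique
--         groups[suffix].sort()
--         # Ajouter les éléments triés au résultat final
--         sorted_list.extend(item for _, item in groups[suffix])
--
--     return sorted_list
-- ===== SOURCE B (Python) =====
-- def sort_by_suffix(lst):
--     def key(item):
--         suffix = ''.join(c for c in item if not c.isdigit())
--         number = int(''.join(c for c in item if c.isdigit()))
--         return (suffix, number, item)
--     return sorted(lst, key=key)
-- ===== Notes on version B (the rewrite author's own statement) =====
-- stated objective: simpler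
-- what changed: Replaces the dict-of-groups construction (group by suffix, sort each group, concatenate over sorted keys) with a single sorted() call on the composite key (suffix, numeric part, item).
import Mathlib
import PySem

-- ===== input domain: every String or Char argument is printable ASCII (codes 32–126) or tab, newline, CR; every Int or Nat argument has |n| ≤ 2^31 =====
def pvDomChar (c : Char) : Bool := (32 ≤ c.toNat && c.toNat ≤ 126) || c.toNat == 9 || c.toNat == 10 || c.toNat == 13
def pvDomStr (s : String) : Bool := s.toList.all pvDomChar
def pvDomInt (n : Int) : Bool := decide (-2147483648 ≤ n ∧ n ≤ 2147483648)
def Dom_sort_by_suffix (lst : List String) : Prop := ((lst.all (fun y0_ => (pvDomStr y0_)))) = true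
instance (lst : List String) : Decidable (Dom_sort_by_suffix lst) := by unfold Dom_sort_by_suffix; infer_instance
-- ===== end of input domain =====

-- B replaces A's group-by-suffix dict, per-group sorts and concatenation by one stable sort on the
-- composite key (suffix, numeric part, item); same return value, stated for lists whose items all
-- contain a digit (elsewhere Python A raises ValueError on int('')).


-- ===== PORT A =====
-- shared with port B: both Pythons compute these per-item values with the same expressions
-- suffix = ''.join(filter(lambda x: not x.isdigit(), item))
def pvSuffix (s : String) : String := String.ofList (s.toList.filter (fun c => !(PySem.Chars.isdigit c)))
-- number = ''.join(filter(str.isdigit, item)); int(number): none = ValueError, excluded by Pre_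
def pvNumber (s : String) : Int :=
  (PySem.Int.ofChars? (s.toList.filter (fun c => PySem.Chars.isdigit c))).getD 0

def sort_by_suffix (lst : List String) : List String :=
  -- groups[suffix].append((int(number), item)), with groups[suffix] = [] when absent
  let groups : PySem.Dict String (List (Int × String)) :=
    lst.foldl (fun g item =>
      g.modify (pvSuffix item) [] (fun cur => cur ++ [(pvNumber item, item)])) PySem.Dict.empty
  -- for suffix in sorted(groups): groups[suffix].sort(); sorted_list.extend(item for _, item in …)
  (PySem.List.sorted groups.keys (fun k => k) false).foldl
    (fun acc su =>
      acc ++ (PySem.List.sorted (groups.getD su []) (fun p => toLex (p.1, p.2)) false).map (fun p => p.2))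
    []

-- ===== PORT B =====
-- key(item) = (suffix, number, item); Python tuple comparison is lexicographic = nested Lex
def pvKeyB (s : String) : Lex ((Lex (String × Int)) × String) :=
  toLex (toLex (pvSuffix s, pvNumber s), s)

def sort_by_suffix_alt (lst : List String) : List String :=
  PySem.List.sorted lst pvKeyB false

-- ===== PRECONDITION & SPEC =====
-- Pre_ excludes lists with an item containing no digit character: there Python A raises ValueError (int('')).
def Pre_sort_by_suffix (lst : List String) : Prop :=
  (lst.all (fun s => s.toList.any (fun c => PySem.Chars.isdigit c))) = true
instance (lst : List String) : Decidable (Pre_sort_by_suffix lst) := by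
  unfold Pre_sort_by_suffix; infer_instance

def pvWitness_sort_by_suffix : List String := ["b2", "a10", "a9", "a10"]

def Spec_sort_by_suffix (lst : List String) (out : List String) : Prop := out = sort_by_suffix_alt lst
instance (lst : List String) (out : List String) : Decidable (Spec_sort_by_suffix lst out) := by
  unfold Spec_sort_by_suffix; infer_instance

-- ===== CLAIM (what is proved, stated in full; the proofs are below) =====
def Claim_equal_sort_by_suffix : Prop :=
  ∀ (lst : List String), Dom_sort_by_suffix lst → Pre_sort_by_suffix lst →
    Spec_sort_by_suffix lst (sort_by_suffix lst)

-- ===== LEMMAS AND PROOFS =====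

-- the pair A stores in the group of item s
def pvPair (s : String) : Int × String := (pvNumber s, s)

-- A's result, written as a flatMap over the sorted distinct suffixes
theorem pvA_eq (lst : List String) :
    sort_by_suffix lst =
      (PySem.List.sorted (PySem.Set.ofList (lst.map pvSuffix)) (fun k => k) false).flatMap
        (fun su =>
          (PySem.List.sorted ((lst.filter (fun s => pvSuffix s == su)).map pvPair)
              (fun p => toLex (p.1, p.2)) false).map (fun p => p.2)) := by
  unfold sort_by_suffix
  have hfold : lst.foldl (fun g item =>
      g.modify (pvSuffix item) [] (fun cur => cur ++ [(pvNumber item, item)])) PySem.Dict.empty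
      = (lst.map (fun s => (pvSuffix s, pvPair s))).foldl
          (fun d p => d.modify p.1 [] (fun cur => cur ++ [p.2])) PySem.Dict.empty := by
    rw [List.foldl_map]; rfl
  have hkeys : (lst.foldl (fun g item =>
      g.modify (pvSuffix item) [] (fun cur => cur ++ [(pvNumber item, item)]))
      (PySem.Dict.empty : PySem.Dict String (List (Int × String)))).keys
      = PySem.Set.ofList (lst.map pvSuffix) := by
    rw [PySem.Dict.keys_foldl_modify_key lst pvSuffix []
      (fun _ item => fun cur => cur ++ [(pvNumber item, item)]) PySem.Dict.empty]
    simp [PySem.Dict.keys_empty, PySem.Set.update, PySem.Set.ofList_eq_foldl]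
  have hgetD : ∀ su, (lst.foldl (fun g item =>
      g.modify (pvSuffix item) [] (fun cur => cur ++ [(pvNumber item, item)]))
      (PySem.Dict.empty : PySem.Dict String (List (Int × String)))).getD su []
      = (lst.filter (fun s => pvSuffix s == su)).map pvPair := by
    intro su
    rw [hfold, PySem.Dict.getD_foldl_modify_append]
    rw [List.filter_map]
    simp [Function.comp_def, List.map_map]
  rw [PySem.List.foldl_append_eq_flatMap]
  simp only [hkeys, hgetD, List.nil_append]

-- one block, with the pair projected away, is a permutation of the items of that suffix
theorem pvBlock_perm (lst : List String) (su : String) :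
    ((PySem.List.sorted ((lst.filter (fun s => pvSuffix s == su)).map pvPair)
        (fun p => toLex (p.1, p.2)) false).map (fun p => p.2)).Perm
      (lst.filter (fun s => pvSuffix s == su)) := by
  have h := (PySem.List.sorted_perm ((lst.filter (fun s => pvSuffix s == su)).map pvPair)
      (fun p => toLex (p.1, p.2)) false).map (fun p : Int × String => p.2)
  simpa [List.map_map, Function.comp_def, pvPair] using h

-- summing 'if v = su then c else 0' over a nodup key list
theorem pvSum_ite (keys : List String) (hnd : keys.Nodup) (v : String) (c : Nat) :
    (keys.map (fun su => if v = su then c else 0)).sum = if v ∈ keys then c else 0 := by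
  induction keys with
  | nil => simp
  | cons k t ih =>
    rcases List.nodup_cons.mp hnd with ⟨hk, ht⟩
    by_cases hv : v = k
    · subst hv
      simp [ih ht, hk]
    · simp [hv, ih ht]

-- flatMap of the per-suffix filters over the distinct suffixes is a permutation of lst
theorem pvCover_perm (lst : List String) :
    ((PySem.Set.ofList (lst.map pvSuffix)).flatMap
        (fun su => lst.filter (fun s => pvSuffix s == su))).Perm lst := by
  rw [List.perm_iff_count]
  intro a
  rw [List.count_flatMap]
  have hrow : ∀ su, List.count a (lst.filter (fun s => pvSuffix s == su))
      = if pvSuffix a = su then List.count a lst else 0 := by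
    intro su
    by_cases h : pvSuffix a = su
    · rw [List.count_filter (by simp [h])]
      simp [h]
    · rw [if_neg h, List.count_eq_zero]
      intro hmem
      exact h (by simpa using (List.mem_filter.mp hmem).2)
  have : ((PySem.Set.ofList (lst.map pvSuffix)).map
      (List.count a ∘ fun su => lst.filter (fun s => pvSuffix s == su))).sum
      = ((PySem.Set.ofList (lst.map pvSuffix)).map
          (fun su => if pvSuffix a = su then List.count a lst else 0)).sum := by
    apply congrArg; apply List.map_congr_left; intro su _; exact hrow su
  rw [this, pvSum_ite _ (PySem.Set.nodup_ofList _) _ _]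
  by_cases ha : a ∈ lst
  · rw [if_pos (by rw [PySem.Set.mem_ofList]; exact List.mem_map_of_mem ha)]
  · simp [List.count_eq_zero.mpr ha]

-- every element of a block carries that block's suffix
theorem pvBlock_suffix (lst : List String) (su x : String)
    (hx : x ∈ (PySem.List.sorted ((lst.filter (fun s => pvSuffix s == su)).map pvPair)
        (fun p => toLex (p.1, p.2)) false).map (fun p => p.2)) : pvSuffix x = su := by
  rcases List.mem_map.mp hx with ⟨p, hp, rfl⟩
  rw [PySem.List.mem_sorted] at hp
  rcases List.mem_map.mp hp with ⟨s, hs, rfl⟩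
  simpa using (List.mem_filter.mp hs).2

-- one block is sorted under B's composite key
theorem pvBlock_pairwise (lst : List String) (su : String) :
    ((PySem.List.sorted ((lst.filter (fun s => pvSuffix s == su)).map pvPair)
        (fun p => toLex (p.1, p.2)) false).map (fun p => p.2)).Pairwise
      (fun a b => pvKeyB a ≤ pvKeyB b) := by
  rw [List.pairwise_map]
  have hpw := PySem.List.sorted_pairwise ((lst.filter (fun s => pvSuffix s == su)).map pvPair)
      (fun p => toLex (p.1, p.2))
  refine hpw.imp_of_mem ?_
  intro p q hp hq h
  have hmem : ∀ r : Int × String, r ∈ PySem.List.sorted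
      ((lst.filter (fun s => pvSuffix s == su)).map pvPair) (fun p => toLex (p.1, p.2)) false →
      r.1 = pvNumber r.2 ∧ pvSuffix r.2 = su := by
    intro r hr
    rw [PySem.List.mem_sorted] at hr
    rcases List.mem_map.mp hr with ⟨s, hs, rfl⟩
    exact ⟨rfl, by simpa using (List.mem_filter.mp hs).2⟩
  rcases hmem p hp with ⟨hp1, hp2⟩
  rcases hmem q hq with ⟨hq1, hq2⟩
  unfold pvKeyB
  rw [Prod.Lex.toLex_le_toLex] at h ⊢
  rcases h with h | ⟨h1, h2⟩
  · left
    show toLex (pvSuffix p.2, pvNumber p.2) < toLex (pvSuffix q.2, pvNumber q.2)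
    rw [Prod.Lex.toLex_lt_toLex]
    right
    refine ⟨hp2.trans hq2.symm, ?_⟩
    rw [← hp1, ← hq1]
    exact h
  · right
    refine ⟨?_, h2⟩
    show toLex (pvSuffix p.2, pvNumber p.2) = toLex (pvSuffix q.2, pvNumber q.2)
    rw [hp2, hq2, ← hp1, ← hq1, h1]

-- the concatenation of the blocks is sorted under B's composite key
theorem pvA_pairwise (lst : List String) :
    (sort_by_suffix lst).Pairwise (fun a b => pvKeyB a ≤ pvKeyB b) := by
  rw [pvA_eq]
  have hk := PySem.List.sorted_ofList_pairwise_lt (lst.map pvSuffix)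
  generalize hK : PySem.List.sorted (PySem.Set.ofList (lst.map pvSuffix)) (fun k => k) false = K at hk
  clear hK
  induction K with
  | nil => simp
  | cons k t ih =>
    rw [List.flatMap_cons, List.pairwise_append]
    rcases List.pairwise_cons.mp hk with ⟨hlt, ht⟩
    refine ⟨pvBlock_pairwise lst k, ih ht, ?_⟩
    intro a ha b hb
    rcases List.mem_flatMap.mp hb with ⟨k', hk', hb'⟩
    have ha' := pvBlock_suffix lst k a ha
    have hb'' := pvBlock_suffix lst k' b hb'
    have : pvSuffix a < pvSuffix b := by rw [ha', hb'']; exact hlt k' hk'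
    unfold pvKeyB
    rw [Prod.Lex.toLex_le_toLex]
    left
    show toLex (pvSuffix a, pvNumber a) < toLex (pvSuffix b, pvNumber b)
    rw [Prod.Lex.toLex_lt_toLex]
    exact Or.inl this

-- A's result is a permutation of the input
theorem pvA_perm (lst : List String) : (sort_by_suffix lst).Perm lst := by
  rw [pvA_eq]
  have h1 : ((PySem.List.sorted (PySem.Set.ofList (lst.map pvSuffix)) (fun k => k) false).flatMap
      (fun su => (PySem.List.sorted ((lst.filter (fun s => pvSuffix s == su)).map pvPair)
        (fun p => toLex (p.1, p.2)) false).map (fun p => p.2))).Perm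
      ((PySem.List.sorted (PySem.Set.ofList (lst.map pvSuffix)) (fun k => k) false).flatMap
        (fun su => lst.filter (fun s => pvSuffix s == su))) := by
    rw [List.flatMap_def, List.flatMap_def]
    apply List.Perm.flatten_congr
    rw [List.forall₂_map_left_iff, List.forall₂_map_right_iff]
    apply List.forall₂_same.mpr
    intro su _
    exact pvBlock_perm lst su
  have h2 := (PySem.List.sorted_perm (PySem.Set.ofList (lst.map pvSuffix)) (fun k => k) false).flatMap
      (g := fun su => lst.filter (fun s => pvSuffix s == su)) (fun a _ => List.Perm.refl _)
  exact (h1.trans h2).trans (pvCover_perm lst)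

-- B's composite key is injective (the item itself is a component)
theorem pvKeyB_inj : Function.Injective pvKeyB := by
  intro a b h
  unfold pvKeyB at h
  exact congrArg Prod.snd (toLex.injective h)

-- ===== VERDICT (by name: the statement is the Claim_ definition above) =====
theorem sort_by_suffix_spec : Claim_equal_sort_by_suffix := by
  intro lst _ _
  unfold Spec_sort_by_suffix sort_by_suffix_alt
  exact PySem.List.eq_of_perm_of_pairwise_le_of_injective pvKeyB pvKeyB_inj
    ((pvA_perm lst).trans (PySem.List.sorted_perm lst pvKeyB false).symm)
    (pvA_pairwise lst)
    (PySem.List.sorted_pairwise lst pvKeyB)
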